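-- pv_equiv track=rewrite | github.com/MOZIJANE/jingxin | 美维/MeiWei_back_0421/akmCtrl/taskUI.py | AGVcount
-- ===== SOURCE A (Python) =====
-- def AGVcount(tasks):
--     ret = {}
--     for task in tasks:
--         if task["agvId"] == "" or task["agvId"] is None:
--             continue
--
--         i = {task["agvId"]:{
--             "count": 2,
--             "success": 1,
--             "fail": 1
--         }}
--         if task["agvId"] not in ret:
--             ret.update(i)
--         else:
--             ret[task["agvId"]]["count"]+=1
--             if task["status"] == "success":
--                 ret[task["agvId"]]["success"]+=1
--             else:
--                 ret[task["agvId"]]["fail"]+=1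
--     return ret
-- ===== SOURCE B (Python) =====
-- def AGVcount(tasks):
--     # Phase 1: ordered grouping agvId -> list of statuses of its NON-FIRST tasks
--     # (A seeds success=fail=1 and ignores the first task's status, so only repeats matter).
--     groups = {}
--     for task in tasks:
--         a = task["agvId"]
--         if a == "" or a is None:
--             continue
--         if a in groups:
--             groups[a].append(task["status"])
--         else:
--             groups[a] = []
--     # Phase 2: aggregate each group by counting.
--     ret = {}
--     for a, statuses in groups.items():
--         succ = 1 + sum(1 for s in statuses if s == "success")
--         ret[a] = {"count": 2 + len(statuses),
--                   "success": succ,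
--                   "fail": 1 + len(statuses) - (succ - 1)}
--     return ret
-- ===== Notes on version B (the rewrite author's own statement) =====
-- stated objective: alternative
-- what changed: B replaces A's single pass of in-place nested counter mutations with a two-phase decomposition: first an ordered grouping of each agvId's non-first task statuses, then an aggregation pass that computes count/success/fail per group by counting.
import Mathlib
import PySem

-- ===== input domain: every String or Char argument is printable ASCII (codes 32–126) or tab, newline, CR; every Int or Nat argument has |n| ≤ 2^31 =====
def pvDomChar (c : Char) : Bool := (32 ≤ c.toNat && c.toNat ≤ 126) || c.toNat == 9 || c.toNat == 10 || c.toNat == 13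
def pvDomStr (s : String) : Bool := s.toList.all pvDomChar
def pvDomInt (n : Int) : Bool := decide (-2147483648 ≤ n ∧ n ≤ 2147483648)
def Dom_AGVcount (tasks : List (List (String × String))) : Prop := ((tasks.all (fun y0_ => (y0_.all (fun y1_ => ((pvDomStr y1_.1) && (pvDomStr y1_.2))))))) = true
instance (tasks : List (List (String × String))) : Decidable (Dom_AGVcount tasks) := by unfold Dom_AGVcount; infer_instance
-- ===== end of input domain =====

-- B re-groups statuses per agvId first and aggregates by counting (alternative decomposition,
-- same cost); equivalence of the return value is proved on Pre_ (where Python A raises no KeyError).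

-- ===== PORT A =====
-- one step of A's loop body; `task["agvId"] is None` cannot fire (values are strings), the
-- lookups task["agvId"]/task["status"] are total via getD because Pre_ guarantees the keys
-- are present exactly where A reads them (outside Pre_ Python A raises KeyError).
def AGVcountStep (ret : PySem.Dict String (PySem.Dict String Int))
    (task : List (String × String)) : PySem.Dict String (PySem.Dict String Int) :=
  let a := (PySem.Dict.mk task).getD "agvId" ""
  if a == "" then ret
  else if ret.contains a = false then
    ret.insert a (PySem.Dict.mk [("count", (2 : Int)), ("success", 1), ("fail", 1)])
  else
    let ret1 := ret.modify a PySem.Dict.empty (fun d => d.modify "count" 0 (· + 1))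
    if (PySem.Dict.mk task).getD "status" "" == "success" then
      ret1.modify a PySem.Dict.empty (fun d => d.modify "success" 0 (· + 1))
    else
      ret1.modify a PySem.Dict.empty (fun d => d.modify "fail" 0 (· + 1))

def AGVcount (tasks : List (List (String × String))) : List (String × List (String × Int)) :=
  (tasks.foldl AGVcountStep PySem.Dict.empty).items.map (fun p => (p.1, p.2.items))

-- ===== PORT B =====
-- phase 1 of Source B: ordered grouping agvId -> statuses of its non-first tasks
def AGVgroupStep (g : PySem.Dict String (List String))
    (task : List (String × String)) : PySem.Dict String (List String) :=
  let a := (PySem.Dict.mk task).getD "agvId" ""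
  if a == "" then g
  else if g.contains a then
    g.modify a [] (· ++ [(PySem.Dict.mk task).getD "status" ""])
  else g.insert a []

-- phase 2 of Source B: aggregate one group by counting (sum(1 for s in statuses if s=="success") = countP)
def AGVaggStep (ret : PySem.Dict String (PySem.Dict String Int))
    (p : String × List String) : PySem.Dict String (PySem.Dict String Int) :=
  let succ : Int := 1 + (p.2.countP (· == "success") : Int)
  ret.insert p.1 (PySem.Dict.mk
    [("count", 2 + (p.2.length : Int)), ("success", succ),
     ("fail", 1 + (p.2.length : Int) - (succ - 1))])

def AGVcount_alt (tasks : List (List (String × String))) : List (String × List (String × Int)) :=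
  let groups := tasks.foldl AGVgroupStep PySem.Dict.empty
  ((groups.items.foldl AGVaggStep PySem.Dict.empty).items).map (fun p => (p.1, p.2.items))

-- ===== PRECONDITION & SPEC =====
-- Pre_ = exactly the inputs where Python A returns: every task has key "agvId", and every task
-- whose nonempty agvId already occurred in an earlier task also has key "status".
def Pre_AGVcount (tasks : List (List (String × String))) : Prop :=
  (∀ t ∈ tasks, "agvId" ∈ t.map Prod.fst) ∧
  (∀ i j : Fin tasks.length, i < j →
     (PySem.Dict.mk (tasks.get i)).get? "agvId" = (PySem.Dict.mk (tasks.get j)).get? "agvId" →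
     (PySem.Dict.mk (tasks.get j)).get? "agvId" ≠ some "" →
     "status" ∈ (tasks.get j).map Prod.fst)
instance (tasks : List (List (String × String))) : Decidable (Pre_AGVcount tasks) := by
  unfold Pre_AGVcount; infer_instance

def pvWitness_AGVcount : (List (List (String × String))) :=
  [[("agvId", "a")], [("agvId", "a"), ("status", "success")], [("agvId", "")]]

def Spec_AGVcount (tasks : List (List (String × String))) (out : List (String × List (String × Int))) : Prop := out = AGVcount_alt tasks
instance (tasks : List (List (String × String))) (out : List (String × List (String × Int))) : Decidable (Spec_AGVcount tasks out) := by unfold Spec_AGVcount; infer_instance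

-- ===== CLAIM (what is proved, stated in full; the proofs are below) =====
def Claim_equal_AGVcount : Prop := ∀ (tasks : List (List (String × String))), Dom_AGVcount tasks → Pre_AGVcount tasks → Spec_AGVcount tasks (AGVcount tasks)

-- ===== LEMMAS AND PROOFS =====

-- the inner dict B builds for a group with status list `sts`
def pvEntry (sts : List String) : PySem.Dict String Int :=
  PySem.Dict.mk
    [("count", 2 + (sts.length : Int)),
     ("success", 1 + (sts.countP (· == "success") : Int)),
     ("fail", 1 + (sts.length : Int) - (sts.countP (· == "success") : Int))]

-- rendering a grouping as A's counter state
def pvRender (g : PySem.Dict String (List String)) : PySem.Dict String (PySem.Dict String Int) :=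
  PySem.Dict.mk (g.items.map (fun p => (p.1, pvEntry p.2)))

theorem pvRender_contains (g : PySem.Dict String (List String)) (a : String) :
    (pvRender g).contains a = g.contains a := by
  simp [pvRender, PySem.Dict.contains, List.any_map, Function.comp_def]

theorem pvRender_get? (g : PySem.Dict String (List String)) (a : String) :
    (pvRender g).get? a = (g.get? a).map pvEntry := by
  simp only [pvRender, PySem.Dict.get?, List.find?_map]
  have hcomp : ((fun p : String × PySem.Dict String Int => p.1 == a) ∘
      fun p : String × List String => (p.1, pvEntry p.2)) = (fun p => p.1 == a) := rfl
  rw [hcomp]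
  cases h : List.find? (fun p => p.1 == a) g.items <;> simp

theorem pvRender_insert (g : PySem.Dict String (List String)) (a : String) (v : List String) :
    pvRender (g.insert a v) = (pvRender g).insert a (pvEntry v) := by
  simp only [PySem.Dict.insert, pvRender_contains]
  by_cases h : g.contains a = true
  · simp only [h, if_pos, pvRender, List.map_map]
    congr 1
    apply List.map_congr_left
    intro p _
    by_cases hp : (p.1 == a) = true <;> simp [hp, Function.comp]
  · simp [h, pvRender]

theorem pvEntry_nil :
    pvEntry [] = PySem.Dict.mk [("count", (2 : Int)), ("success", 1), ("fail", 1)] := by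
  decide

-- two successive modifies of the same outer key collapse to one insert
theorem pvModify_modify (d : PySem.Dict String (PySem.Dict String Int)) (a : String)
    (f h : PySem.Dict String Int → PySem.Dict String Int) :
    (d.modify a PySem.Dict.empty f).modify a PySem.Dict.empty h
      = d.insert a (h (f (d.getD a PySem.Dict.empty))) := by
  simp [PySem.Dict.modify, PySem.Dict.insert_insert_self, PySem.Dict.getD_insert_self]

theorem pvEntry_step (sts : List String) (s : String) :
    ((pvEntry sts).modify "count" 0 (· + 1)).modify
        (if (s == "success") then "success" else "fail") 0 (· + 1)
      = pvEntry (sts ++ [s]) := by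
  by_cases hs : (s == "success") = true <;>
    simp [hs, pvEntry, PySem.Dict.modify, PySem.Dict.getD, PySem.Dict.get?,
      PySem.Dict.insert, PySem.Dict.contains, List.countP_append] <;>
    ring_nf <;> simp


theorem pvStep_comm (g : PySem.Dict String (List String)) (task : List (String × String)) :
    AGVcountStep (pvRender g) task = pvRender (AGVgroupStep g task) := by
  unfold AGVcountStep AGVgroupStep
  set a := (PySem.Dict.mk task).getD "agvId" "" with ha
  by_cases h0 : (a == "") = true
  · simp [h0]
  · by_cases hc : g.contains a = true
    · have hget : (pvRender g).getD a PySem.Dict.empty = pvEntry (g.getD a []) := by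
        cases hg : g.get? a with
        | none =>
          exfalso
          have h2 := PySem.Dict.contains_eq_isSome_get? g a
          rw [hg] at h2; rw [hc] at h2; simp at h2
        | some v =>
          rw [PySem.Dict.getD_of_get?_eq_some g [] hg,
              PySem.Dict.getD_of_get?_eq_some (pvRender g) PySem.Dict.empty
                (by rw [pvRender_get?, hg]; rfl)]
      set s := (PySem.Dict.mk task).getD "status" "" with hs
      have hstep := pvEntry_step (g.getD a []) s
      simp only [h0, pvRender_contains, hc, Bool.true_eq_false, ite_false, ite_true,
        Bool.false_eq_true]
      by_cases hsucc : (s == "success") = true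
      · rw [if_pos hsucc] at hstep ⊢
        rw [pvModify_modify, hget, hstep, PySem.Dict.modify, ← pvRender_insert]
      · rw [if_neg hsucc] at hstep ⊢
        rw [pvModify_modify, hget, hstep, PySem.Dict.modify, ← pvRender_insert]
    · simp only [h0, pvRender_contains, hc, Bool.false_eq_true, if_false, ite_false,
        ite_true, if_pos, eq_self_iff_true, Bool.not_eq_true]
      rw [pvRender_insert, pvEntry_nil]

theorem pvFold_comm (tasks : List (List (String × String)))
    (g : PySem.Dict String (List String)) :
    tasks.foldl AGVcountStep (pvRender g) = pvRender (tasks.foldl AGVgroupStep g) := by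
  induction tasks generalizing g with
  | nil => rfl
  | cons t ts ih => simp only [List.foldl_cons, pvStep_comm, ih]

-- phase-2 entries equal pvEntry (1 + len - (succ - 1) = 1 + len - count)
theorem pvAgg_entry (sts : List String) :
    PySem.Dict.mk
      [("count", 2 + (sts.length : Int)),
       ("success", 1 + (sts.countP (· == "success") : Int)),
       ("fail", 1 + (sts.length : Int) - ((1 + (sts.countP (· == "success") : Int)) - 1))]
      = pvEntry sts := by
  simp [pvEntry]

-- groups built from empty have nodup keys
theorem pvGroup_nodup (tasks : List (List (String × String)))
    (g : PySem.Dict String (List String)) (h : g.keys.Nodup) :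
    (tasks.foldl AGVgroupStep g).keys.Nodup := by
  induction tasks generalizing g with
  | nil => exact h
  | cons t ts ih =>
    refine ih _ ?_
    unfold AGVgroupStep
    dsimp only
    split
    · exact h
    · split
      · simpa [PySem.Dict.modify] using PySem.Dict.nodup_keys_insert _ _ _ h
      · exact PySem.Dict.nodup_keys_insert _ _ _ h

-- phase 2 over fresh distinct keys just rebuilds the item list
theorem pvAgg_items (g : PySem.Dict String (List String)) (h : g.keys.Nodup) :
    (g.items.foldl AGVaggStep PySem.Dict.empty).items
      = g.items.map (fun p => (p.1, pvEntry p.2)) := by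
  have := PySem.Dict.items_foldl_insert_fresh (l := g.items) (d := PySem.Dict.empty)
    (k := fun p => p.1)
    (v := fun p => PySem.Dict.mk
      [("count", 2 + (p.2.length : Int)),
       ("success", 1 + (p.2.countP (· == "success") : Int)),
       ("fail", 1 + (p.2.length : Int) - ((1 + (p.2.countP (· == "success") : Int)) - 1))])
    (by intro a _; rfl) (by simpa [PySem.Dict.keys] using h)
  calc (g.items.foldl AGVaggStep PySem.Dict.empty).items
      = PySem.Dict.empty.items ++ g.items.map
          (fun p => (p.1, PySem.Dict.mk
            [("count", 2 + (p.2.length : Int)),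
             ("success", 1 + (p.2.countP (· == "success") : Int)),
             ("fail", 1 + (p.2.length : Int) - ((1 + (p.2.countP (· == "success") : Int)) - 1))])) := by
        rw [← this]; rfl
    _ = g.items.map (fun p => (p.1, pvEntry p.2)) := by
        simp only [PySem.Dict.empty, List.nil_append]
        exact List.map_congr_left (fun p _ => by rw [pvAgg_entry])

-- ===== VERDICT (by name: the statement is the Claim_ definition above) =====
theorem AGVcount_spec : Claim_equal_AGVcount := by
  intro tasks _ _
  unfold Spec_AGVcount AGVcount AGVcount_alt
  dsimp only
  have hfold : tasks.foldl AGVcountStep PySem.Dict.empty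
      = pvRender (tasks.foldl AGVgroupStep PySem.Dict.empty) := by
    have : (PySem.Dict.empty : PySem.Dict String (PySem.Dict String Int))
        = pvRender PySem.Dict.empty := rfl
    rw [this, pvFold_comm]
  rw [hfold, pvAgg_items _ (pvGroup_nodup tasks PySem.Dict.empty (by simp [PySem.Dict.keys, PySem.Dict.empty]))]
  simp [pvRender]
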